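-- pv_equiv track=rewrite | github.com/UMNLibraries/holdings-from-isbns | dedup_split_ids.py | split_ids
-- ===== SOURCE A (Python) =====
-- from itertools import islice
--
-- def split_ids(idlist, length=9999):
--     '''Returns multiple lists of a specified length from a single list.
--     Parameters: list to divide, number of members in sublists (length=, default=9999)'''
--     full_len = len(idlist)
--     sublist_no = full_len // length
--     lines_list = []
--     while sublist_no > 0:
--         lines_list.append(length)
--         sublist_no -= 1
--     last_list = full_len % length
--     if last_list != 0:
--         lines_list.append(last_list)
--     id_list = iter(idlist)
--     id_subs = [list(islice(id_list, x)) for x in lines_list]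
--     return id_subs
-- ===== SOURCE B (Python) =====
-- def split_ids(idlist, length=9999):
--     '''Returns multiple lists of a specified length from a single list.
--     Parameters: list to divide, number of members in sublists (length=, default=9999)'''
--     return [idlist[i:i + length] for i in range(0, len(idlist), length)]
-- ===== Notes on version B (the rewrite author's own statement) =====
-- stated objective: idiomatic
-- what changed: B replaces A's sizes-list construction (floor-division while-loop appending chunk lengths, then consuming a shared islice iterator) with a single index-based slicing comprehension over range(0, len(idlist), length).
import Mathlib
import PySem

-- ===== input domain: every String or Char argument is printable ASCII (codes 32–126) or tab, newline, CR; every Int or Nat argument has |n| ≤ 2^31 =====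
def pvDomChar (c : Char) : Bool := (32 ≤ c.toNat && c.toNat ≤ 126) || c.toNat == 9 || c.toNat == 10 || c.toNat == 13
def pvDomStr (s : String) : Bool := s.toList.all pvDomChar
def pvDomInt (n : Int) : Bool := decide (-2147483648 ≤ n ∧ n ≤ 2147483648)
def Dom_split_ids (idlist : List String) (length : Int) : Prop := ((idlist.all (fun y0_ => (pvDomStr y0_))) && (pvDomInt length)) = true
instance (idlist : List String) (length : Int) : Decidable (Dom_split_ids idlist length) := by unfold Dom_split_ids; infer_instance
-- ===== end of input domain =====

-- B builds the chunks directly by index-based slicing over range(0, len, length);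
-- it drops A's while-loop-built sizes list and the shared islice iterator (idiomatic, same O(n) cost).

-- ===== PORT A =====
-- the 'while sublist_no > 0: lines_list.append(length)' loop
def split_ids_lines (sublist_no : Int) (length : Int) (acc : List Int) : List Int :=
  if _h : sublist_no > 0 then split_ids_lines (sublist_no - 1) length (acc ++ [length]) else acc
termination_by sublist_no.toNat
decreasing_by omega

-- the comprehension '[list(islice(id_list, x)) for x in lines_list]' consuming one shared iterator;
-- islice counts reached here are nonnegative under Pre_, so take/drop with x.toNat is exact
def split_ids_islice (rest : List String) (lines : List Int) : List (List String) :=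
  match lines with
  | [] => []
  | x :: xs => (rest.take x.toNat) :: split_ids_islice (rest.drop x.toNat) xs

def split_ids (idlist : List String) (length : Int) : List (List String) :=
  let full_len : Int := idlist.length
  let sublist_no := PySem.Int.floordiv full_len length
  let lines_list := split_ids_lines sublist_no length []
  let last_list := PySem.Int.mod full_len length
  let lines_list2 := if last_list ≠ 0 then lines_list ++ [last_list] else lines_list
  split_ids_islice idlist lines_list2

-- ===== PORT B =====
def split_ids_alt (idlist : List String) (length : Int) : List (List String) :=
  (PySem.List.pyRange 0 (idlist.length : Int) length).map
    (fun i => PySem.List.slice idlist (some i) (some (i + length)))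

-- ===== PRECONDITION & SPEC =====
-- Pre_ excludes length = 0 (A raises ZeroDivisionError) and negative lengths that do not divide
-- len(idlist) (the negative remainder reaches islice and A raises ValueError); A returns normally
-- everywhere else.
def Pre_split_ids (idlist : List String) (length : Int) : Prop :=
  0 < length ∨ (length < 0 ∧ (idlist.length : Int) % length = 0)
instance (idlist : List String) (length : Int) : Decidable (Pre_split_ids idlist length) := by
  unfold Pre_split_ids; infer_instance

def pvWitness_split_ids : List String × Int := (["a", "b", "c"], 2)

def Spec_split_ids (idlist : List String) (length : Int) (out : List (List String)) : Prop :=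
  out = split_ids_alt idlist length
instance (idlist : List String) (length : Int) (out : List (List String)) : Decidable (Spec_split_ids idlist length out) := by unfold Spec_split_ids; infer_instance

-- ===== CLAIM (what is proved, stated in full; the proofs are below) =====
def Claim_equal_split_ids : Prop := ∀ (idlist : List String) (length : Int), Dom_split_ids idlist length → Pre_split_ids idlist length → Spec_split_ids idlist length (split_ids idlist length)

-- ===== LEMMAS AND PROOFS =====

theorem split_ids_lines_eq_aux (L : Int) : ∀ (n : Nat) (q : Int), q.toNat = n → ∀ acc,
    split_ids_lines q L acc = acc ++ List.replicate n L := by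
  intro n
  induction n with
  | zero => intro q hq acc; rw [split_ids_lines, dif_neg (by omega)]; simp
  | succ m ih =>
    intro q hq acc
    rw [split_ids_lines, dif_pos (by omega), ih (q - 1) (by omega)]
    simp [List.replicate_succ]

theorem split_ids_lines_eq (q L : Int) (acc : List Int) :
    split_ids_lines q L acc = acc ++ List.replicate q.toNat L :=
  split_ids_lines_eq_aux L q.toNat q rfl acc

-- canonical form of A's lines list
theorem split_ids_eq_islice (xs : List String) (L : Int) (hL : 0 < L) :
    split_ids xs L = split_ids_islice xs
      (List.replicate ((xs.length : Int) / L).toNat L ++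
        (if (xs.length : Int) % L ≠ 0 then [(xs.length : Int) % L] else [])) := by
  simp only [split_ids, PySem.Int.floordiv_eq_ediv_of_pos hL, PySem.Int.mod_eq_emod_of_pos hL,
    split_ids_lines_eq, List.nil_append]
  split_ifs <;> simp

theorem split_ids_nil (L : Int) : split_ids [] L = [] := by
  simp [split_ids, PySem.Int.floordiv, PySem.Int.mod, Int.zero_fdiv, Int.zero_fmod,
    split_ids_lines_eq, split_ids_islice]

theorem split_ids_alt_nil (L : Int) : split_ids_alt [] L = [] := by
  simp [split_ids_alt, PySem.List.pyRange]

theorem split_ids_neg (xs : List String) (L : Int) (hL : L < 0)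
    (hd : (xs.length : Int) % L = 0) : split_ids xs L = [] := by
  have h1 : PySem.Int.floordiv (xs.length : Int) L ≤ 0 :=
    Int.fdiv_nonpos_of_nonneg_of_nonpos (by omega) (by omega)
  have h2 : PySem.Int.mod (xs.length : Int) L = 0 :=
    (PySem.Int.mod_eq_zero_iff_dvd _ _).mpr (Int.dvd_of_emod_eq_zero hd)
  simp [split_ids, split_ids_lines_eq, h2, Int.toNat_of_nonpos h1, split_ids_islice]

theorem split_ids_alt_neg (xs : List String) (L : Int) (hL : L < 0) :
    split_ids_alt xs L = [] := by
  have h1 : ¬ (0:Int) < L := by omega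
  have h2 : ¬ ((xs.length:Int) < 0) := by omega
  simp [split_ids_alt, PySem.List.pyRange, h1, h2, hL.ne]

theorem split_ids_step (xs : List String) (L : Int) (hx : xs ≠ []) (hL : 0 < L) :
    split_ids xs L = xs.take L.toNat :: split_ids (xs.drop L.toNat) L := by
  have hn : 0 < xs.length := List.length_pos_iff.mpr hx
  rw [split_ids_eq_islice xs L hL, split_ids_eq_islice _ L hL]
  by_cases hle : (L : Int) ≤ (xs.length : Int)
  · have hdl : ((xs.drop L.toNat).length : Int) = (xs.length : Int) - L := by
      simp; omega
    have hsplit : (xs.length : Int) = ((xs.drop L.toNat).length : Int) + 1 * L := by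
      rw [hdl]; ring
    have hq : (xs.length : Int) / L = ((xs.drop L.toNat).length : Int) / L + 1 := by
      rw [hsplit, Int.add_mul_ediv_right _ _ hL.ne']
    have hr : (xs.length : Int) % L = ((xs.drop L.toNat).length : Int) % L := by
      rw [hsplit, show ((xs.drop L.toNat).length : Int) + 1 * L
        = ((xs.drop L.toNat).length : Int) + L * 1 from by ring, Int.add_mul_emod_self_left]
    have hq0 : 0 ≤ ((xs.drop L.toNat).length : Int) / L := Int.ediv_nonneg (by omega) hL.le
    have hqt : ((xs.length : Int) / L).toNat = (((xs.drop L.toNat).length : Int) / L).toNat + 1 := by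
      omega
    rw [hq, hr, show (((xs.drop L.toNat).length : Int) / L + 1).toNat
      = (((xs.drop L.toNat).length : Int) / L).toNat + 1 from by omega, List.replicate_succ]
    simp only [List.cons_append, split_ids_islice]
  · have hq : (xs.length : Int) / L = 0 := Int.ediv_eq_zero_of_lt (by omega) (by omega)
    have hr : (xs.length : Int) % L = (xs.length : Int) := Int.emod_eq_of_lt (by omega) (by omega)
    have hdrop : xs.drop L.toNat = [] := List.drop_eq_nil_of_le (by omega)
    rw [hq, hr, hdrop]
    simp [split_ids_islice, hn.ne', List.take_of_length_le (by omega : xs.length ≤ L.toNat)]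

theorem split_ids_alt_step (xs : List String) (L : Int) (hx : xs ≠ []) (hL : 0 < L) :
    split_ids_alt xs L = xs.take L.toNat :: split_ids_alt (xs.drop L.toNat) L := by
  have hn : 0 < xs.length := List.length_pos_iff.mpr hx
  have hdl : ((xs.drop L.toNat).length : Int) = (xs.length : Int) - L ∨
      ((xs.drop L.toNat).length : Int) = 0 := by
    simp; omega
  -- counts
  have hc : (if (0:Int) < (xs.length:Int) then (((xs.length:Int) - 0 + L - 1) / L).toNat else 0)
      = (((xs.length:Int) - 1) / L).toNat + 1 := by
    rw [if_pos (by omega)]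
    have : ((xs.length:Int) - 0 + L - 1) = ((xs.length:Int) - 1) + 1 * L := by ring
    rw [this, Int.add_mul_ediv_right _ _ hL.ne']
    have : 0 ≤ ((xs.length:Int) - 1) / L := Int.ediv_nonneg (by omega) hL.le
    omega
  have hc' : (if (0:Int) < ((xs.drop L.toNat).length:Int) then
      ((((xs.drop L.toNat).length:Int) - 0 + L - 1) / L).toNat else 0)
      = (((xs.length:Int) - 1) / L).toNat := by
    by_cases hle : L < (xs.length : Int)
    · rw [if_pos (by simp; omega)]
      congr 1
      have h1 : ((xs.drop L.toNat).length : Int) = (xs.length : Int) - L := by simp; omega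
      rw [h1]
      congr 1
      ring
    · rw [if_neg (by simp; omega)]
      have : ((xs.length:Int) - 1) / L = 0 := Int.ediv_eq_zero_of_lt (by omega) (by omega)
      omega
  simp only [split_ids_alt, PySem.List.pyRange]
  rw [if_neg hL.ne', if_neg hL.ne']
  simp only [if_pos hL, hc, hc', List.range_succ_eq_map, List.map_cons, List.map_map]
  congr 1
  · -- head: slice xs 0 (0 + L) = take L.toNat
    rw [show ((0:Int) + L * ((0:Nat):Int)) = 0 from by simp,
        show ((0:Int) + L) = L from by ring]
    simp only [PySem.List.slice_zero_start]
    exact PySem.List.slice_to xs hL.le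
  · apply List.map_congr_left
    intro k hk
    simp only [Function.comp_apply]
    push_cast [Nat.succ_eq_add_one]
    have hk0 : (0:Int) ≤ L * (k:Int) := by positivity
    rw [show (0:Int) + L * ((k:Int)+1) = L*(k:Int) + L from by ring,
        show (0:Int) + L * (k:Int) = L * (k:Int) from by ring]
    have hLk : (0:Int) ≤ L * (k:Int) + L := by nlinarith
    have hLk2 : (0:Int) ≤ L * (k:Int) + L + L := by nlinarith
    rw [PySem.List.slice_toNat xs hLk hLk2,
        PySem.List.slice_toNat _ hk0 hLk]
    rw [List.drop_drop]
    congr 1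
    · omega
    · congr 1
      omega

theorem split_ids_eq_alt_pos (L : Int) (hL : 0 < L) :
    ∀ (n : Nat) (xs : List String), xs.length = n → split_ids xs L = split_ids_alt xs L := by
  intro n
  induction n using Nat.strong_induction_on with
  | _ n ih =>
    intro xs hxs
    by_cases hx : xs = []
    · subst hx; rw [split_ids_nil, split_ids_alt_nil]
    · have hn : 0 < xs.length := List.length_pos_iff.mpr hx
      rw [split_ids_step xs L hx hL, split_ids_alt_step xs L hx hL,
        ih (xs.drop L.toNat).length (by simp; omega) _ rfl]

-- ===== VERDICT (by name: the statement is the Claim_ definition above) =====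
theorem split_ids_spec : Claim_equal_split_ids := by
  intro idlist length _ hpre
  unfold Spec_split_ids
  rcases hpre with hL | ⟨hL, hd⟩
  · exact split_ids_eq_alt_pos length hL idlist.length idlist rfl
  · rw [split_ids_neg idlist length hL hd, split_ids_alt_neg idlist length hL]
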